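-- pv_equiv track=rewrite | github.com/scsd3211/AILOGPDT | VOICELOGIC/VoiceStrCompare.py | compareHowMany
-- ===== SOURCE A (Python) =====
-- def compareHowMany(a,b):
--     tempCount =0;
--     c = a^b
--     if(c  !=  0):
--         for i in range(0,4):
--             j = c>>i & 0x1
--             if(j == 1):
--                 tempCount = tempCount +1;
--     else:
--         pass
--
--     return tempCount
-- ===== SOURCE B (Python) =====
-- def compareHowMany(a, b):
--     # count differing bits among the low 4 bits: Kernighan's trick,
--     # one iteration per set bit instead of one per bit position
--     c = (a ^ b) % 16
--     count = 0
--     while c: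
--         c &= c - 1
--         count += 1
--     return count
-- ===== Notes on version B (the rewrite author's own statement) =====
-- stated objective: alternative
-- what changed: Instead of scanning the four fixed bit positions of a^b with shift-and-test, B reduces a^b modulo 16 (equal to the & 0xF mask in Python) and counts set bits with Kernighan's c &= c-1 loop, iterating once per set bit.
import Mathlib
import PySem

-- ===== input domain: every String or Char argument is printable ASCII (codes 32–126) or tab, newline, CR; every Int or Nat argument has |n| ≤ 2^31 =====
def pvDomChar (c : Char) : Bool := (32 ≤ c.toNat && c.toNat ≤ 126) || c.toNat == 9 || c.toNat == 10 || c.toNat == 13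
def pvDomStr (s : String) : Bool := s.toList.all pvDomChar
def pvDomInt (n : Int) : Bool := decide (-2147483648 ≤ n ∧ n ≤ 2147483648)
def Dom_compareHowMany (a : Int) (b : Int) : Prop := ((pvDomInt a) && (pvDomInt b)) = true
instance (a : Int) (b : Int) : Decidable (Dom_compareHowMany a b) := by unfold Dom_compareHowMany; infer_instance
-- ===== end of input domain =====

-- B counts the set bits of (a^b) mod 16 with Kernighan's c &= c-1 loop (one step per
-- set bit) instead of A's shift-and-test over the four fixed bit positions.

-- ===== PORT A =====
-- literal transliteration of A: c = a^b; if c != 0, for i in range(0,4): j = c>>i & 1; count j==1.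
-- (i ranges over 0..3, so i.toNat is exact for the shift amount)
def compareHowMany (a : Int) (b : Int) : Int :=
  let tempCount : Int := 0
  let c : Int := PySem.Int.bxor a b
  if c ≠ 0 then
    (PySem.List.pyRange 0 4 1).foldl
      (fun tempCount i =>
        let j : Int := PySem.Int.band (c >>> i.toNat) 1
        if j = 1 then tempCount + 1 else tempCount)
      tempCount
  else tempCount

-- ===== PORT B =====
-- the while loop of Source B; the fuel 4 only makes it total: c < 16 has at most 4 set bits
def kernighanCount : Nat → Int → Int → Int
  | 0, _, count => count
  | fuel + 1, c, count =>
    if c ≠ 0 then kernighanCount fuel (PySem.Int.band c (c - 1)) (count + 1) else count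

def compareHowMany_alt (a : Int) (b : Int) : Int :=
  kernighanCount 4 (PySem.Int.mod (PySem.Int.bxor a b) 16) 0

-- ===== PRECONDITION & SPEC =====
def Spec_compareHowMany (a : Int) (b : Int) (out : Int) : Prop := out = compareHowMany_alt a b
instance (a : Int) (b : Int) (out : Int) : Decidable (Spec_compareHowMany a b out) := by unfold Spec_compareHowMany; infer_instance

-- ===== CLAIM (what is proved, stated in full; the proofs are below) =====
def Claim_equal_compareHowMany : Prop := ∀ (a : Int) (b : Int), Dom_compareHowMany a b → Spec_compareHowMany a b (compareHowMany a b)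

-- ===== LEMMAS AND PROOFS =====

-- Lean's homogeneous Int>>>Int on a cast Nat agrees with the Nat-shift
theorem pv_shiftRight_cast (m : Int) (n : Nat) : m >>> (n : Int) = m >>> n := by
  cases m <;> cases n <;> rfl

-- bit i (i < 4) of c only depends on c modulo 16
theorem pv_bit_congr (q r : Int) (i : Nat) (hi : i < 4) :
    PySem.Int.band ((16 * q + r) >>> i) 1 = PySem.Int.band (r >>> i) 1 := by
  rw [PySem.Int.band_one, PySem.Int.band_one]
  unfold PySem.Int.mod
  rw [Int.shiftRight_eq_div_pow, Int.shiftRight_eq_div_pow, Int.fmod_eq_emod, Int.fmod_eq_emod]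
  interval_cases i <;> norm_num <;> omega

theorem pv_main (c : Int) :
    (if c ≠ 0 then
      (PySem.List.pyRange 0 4 1).foldl
        (fun tempCount i =>
          let j : Int := PySem.Int.band (c >>> i.toNat) 1
          if j = 1 then tempCount + 1 else tempCount)
        0
    else 0) = kernighanCount 4 (PySem.Int.mod c 16) 0 := by
  obtain ⟨q, r, h0, h16, rfl⟩ : ∃ q r : Int, 0 ≤ r ∧ r < 16 ∧ c = 16 * q + r :=
    ⟨c / 16, c % 16, Int.emod_nonneg c (by norm_num), Int.emod_lt_of_pos c (by norm_num),
      by omega⟩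
  have hmod : PySem.Int.mod (16 * q + r) 16 = r := by
    unfold PySem.Int.mod
    rw [Int.fmod_eq_emod]
    norm_num
    omega
  rw [hmod]
  have hlist : PySem.List.pyRange 0 4 1 = [0, 1, 2, 3] := by decide
  rw [hlist]
  simp only [List.foldl]
  by_cases hc : 16 * q + r = 0
  · have hr : r = 0 := by omega
    subst hr
    rw [if_neg (by omega)]
    decide
  · rw [if_pos hc]
    have e0 := pv_bit_congr q r (Int.toNat 0) (by decide)
    have e1 := pv_bit_congr q r (Int.toNat 1) (by decide)
    have e2 := pv_bit_congr q r (Int.toNat 2) (by decide)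
    have e3 := pv_bit_congr q r (Int.toNat 3) (by decide)
    simp only [pv_shiftRight_cast]
    rw [e0, e1, e2, e3]
    interval_cases r <;> decide

-- ===== VERDICT (by name: the statement is the Claim_ definition above) =====
theorem compareHowMany_spec : Claim_equal_compareHowMany := by
  intro a b _
  unfold Spec_compareHowMany compareHowMany compareHowMany_alt
  exact pv_main (PySem.Int.bxor a b)
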